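-- pv_equiv track=rewrite | github.com/zhoufengzd/python | _exercise/_basics/_algorithm/search/flip.py | findMaxZeroCount
-- ===== SOURCE A (Python) =====
-- def findMaxZeroCount(arr):
--     n = len(arr)
--
--     # Initialize count of zeros and
--     # maximum difference between count
--     # of 1s and 0s in a subarray
--     orig_zero_count = 0
--
--     # Initialize overall max diff
--     # for any subarray
--     max_diff = 0
--
--     # Initialize current diff
--     curr_max = 0
--
--     for i in range(n):
--
--         # Count of zeros in original
--         # array (Not related to
--         # Kadane's algorithm)
--         if arr[i] == 0:
--             orig_zero_count += 1
--
--         # Value to be considered for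
--         # finding maximum sum
--         val = 1 if arr[i] == 1 else -1
--
--         # Update current max and max_diff
--         curr_max = max(val, curr_max + val)
--         max_diff = max(max_diff, curr_max)
--
--     max_diff = max(0, max_diff)
--
--     return orig_zero_count + max_diff
-- ===== SOURCE B (Python) =====
-- def findMaxZeroCount(arr):
--     # Staged passes: count zeros, build the prefix-sum list (1 -> +1, else -1),
--     # build the running-minimum list, then the answer is
--     # zeros + max_k (prefix[k] - min(prefix[0..k])).
--     zeros = arr.count(0)
--     prefixes = [0]
--     for x in arr:
--         prefixes.append(prefixes[-1] + (1 if x == 1 else -1))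
--     mins = []
--     m = prefixes[0]
--     for p in prefixes:
--         m = min(m, p)
--         mins.append(m)
--     diffs = [p - m for p, m in zip(prefixes, mins)]
--     return zeros + max(diffs)
-- ===== Notes on version B (the rewrite author's own statement) =====
-- stated objective: alternative
-- what changed: Replaces Kadane's single-pass curr_max/max_diff recurrence by staged passes: a zero count, an explicit prefix-sum list, a running-minimum list, and a final max over their pointwise differences.
import Mathlib
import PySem

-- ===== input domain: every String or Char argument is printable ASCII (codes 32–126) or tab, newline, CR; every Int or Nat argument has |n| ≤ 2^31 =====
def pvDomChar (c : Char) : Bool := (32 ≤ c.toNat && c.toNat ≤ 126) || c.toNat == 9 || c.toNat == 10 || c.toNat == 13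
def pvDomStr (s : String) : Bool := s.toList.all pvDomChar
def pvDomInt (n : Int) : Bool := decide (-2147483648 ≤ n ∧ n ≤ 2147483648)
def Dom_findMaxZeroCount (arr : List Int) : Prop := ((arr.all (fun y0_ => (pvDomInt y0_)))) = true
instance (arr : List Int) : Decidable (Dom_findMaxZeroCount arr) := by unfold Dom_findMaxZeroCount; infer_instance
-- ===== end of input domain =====

-- B replaces A's single-pass Kadane recurrence by staged list passes (zero count,
-- prefix-sum list, running-minimum list, max of pointwise differences): an
-- alternative decomposition, same cost.

-- ===== PORT A =====
-- state: (orig_zero_count, max_diff, curr_max)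
def stepA (st : Int × Int × Int) (x : Int) : Int × Int × Int :=
  let z := if x = 0 then st.1 + 1 else st.1
  let val : Int := if x = 1 then 1 else -1
  let cm := max val (st.2.2 + val)
  let md := max st.2.1 cm
  (z, md, cm)

def findMaxZeroCount (arr : List Int) : Int :=
  let s := arr.foldl stepA (0, 0, 0)
  s.1 + max 0 s.2.1

-- ===== PORT B =====
-- prefixes = [p, p+v x0, p+v x0+v x1, ...]  (the list Python builds by appending)
def prefixList : List Int → Int → List Int
  | [], p => [p]
  | x :: t, p => p :: prefixList t (p + (if x = 1 then 1 else -1))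

-- mins: running minimum, seeded with m
def minScan : List Int → Int → List Int
  | [], _ => []
  | q :: t, m => min m q :: minScan t (min m q)

def findMaxZeroCount_alt (arr : List Int) : Int :=
  let zeros : Int := (arr.count 0 : Nat)
  let prefixes := prefixList arr 0
  let mins := minScan prefixes (prefixes.headD 0)
  let diffs := List.zipWith (fun p m => p - m) prefixes mins
  let best := match diffs with
    | [] => 0                 -- unreachable: prefixes is nonempty
    | d :: dt => dt.foldl max d   -- Python max(diffs)
  zeros + best

-- ===== PRECONDITION & SPEC =====
def Spec_findMaxZeroCount (arr : List Int) (out : Int) : Prop := out = findMaxZeroCount_alt arr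
instance (arr : List Int) (out : Int) : Decidable (Spec_findMaxZeroCount arr out) := by unfold Spec_findMaxZeroCount; infer_instance

-- ===== CLAIM =====
def Claim_equal_findMaxZeroCount : Prop := ∀ (arr : List Int), Dom_findMaxZeroCount arr → Spec_findMaxZeroCount arr (findMaxZeroCount arr)

-- ===== LEMMAS AND PROOFS =====

-- proof-only helper: the tail of B's diffs list, computed in one recursion
def dsRec : List Int → Int → Int → List Int
  | [], _, _ => []
  | x :: t, p, m =>
    let p' := p + (if x = 1 then 1 else -1)
    let m' := min m p'
    (p' - m') :: dsRec t p' m'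

theorem staged_eq : ∀ (l : List Int) (p m : Int),
    List.zipWith (fun a c => a - c) (prefixList l p) (minScan (prefixList l p) m)
      = (p - min m p) :: dsRec l p (min m p) := by
  intro l
  induction l with
  | nil => intro p m; simp [prefixList, minScan, dsRec]
  | cons x t ih =>
    intro p m
    simp only [prefixList, minScan, List.zipWith, dsRec, ih]

theorem zeros_inv : ∀ (l : List Int) (z md cm : Int),
    (l.foldl stepA (z, md, cm)).1 = z + (l.count 0 : Nat) := by
  intro l
  induction l with
  | nil => intro z md cm; simp
  | cons x t ih =>
    intro z md cm
    simp only [List.foldl_cons, stepA, ih]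
    by_cases hx : x = 0 <;> simp [hx]; omega

theorem best_inv : ∀ (l : List Int) (z md cm p m b : Int),
    b = max md 0 → max cm 0 = p - m → m ≤ p →
    max (l.foldl stepA (z, md, cm)).2.1 0 = (dsRec l p m).foldl max b := by
  intro l
  induction l with
  | nil => intro z md cm p m b h1 _ _; simpa [dsRec] using h1.symm
  | cons x t ih =>
    intro z md cm p m b h1 h2 h3
    simp only [List.foldl_cons, stepA, dsRec]
    apply ih
    · -- b ⊔ (p' - min m p') = max (max md (max val (cm+val))) 0
      rcases le_or_gt m (p + (if x = 1 then 1 else -1)) with h | h <;>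
        simp only [max_def, min_def] at * <;> split_ifs at * <;> omega
    · rcases le_or_gt m (p + (if x = 1 then 1 else -1)) with h | h <;>
        simp only [max_def, min_def] at * <;> split_ifs at * <;> omega
    · simp only [min_def]; split_ifs <;> omega

-- ===== VERDICT =====
theorem findMaxZeroCount_spec : Claim_equal_findMaxZeroCount := by
  unfold Claim_equal_findMaxZeroCount Spec_findMaxZeroCount
  intro arr _
  unfold findMaxZeroCount findMaxZeroCount_alt
  have hhead : ∀ (l : List Int) (p : Int), (prefixList l p).headD 0 = p := by
    intro l p; cases l <;> rfl
  have hds := staged_eq arr 0 0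
  have hz := zeros_inv arr 0 0 0
  have hb := best_inv arr 0 0 0 0 0 0 (by simp) (by simp) le_rfl
  simp only [hhead, hds, min_self, sub_self]
  omega
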